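-- pv_equiv track=rewrite | github.com/zhouchanghai/problem_ans | codility/2018Selenium.py | iterNonEmpty
-- ===== SOURCE A (Python) =====
-- def iterNonEmpty(count):
--     i = 0
--     while i < len(count):
--         if count[i] == 0:
--             i += 1
--         else:
--             count[i] -= 1
--             yield i
-- ===== SOURCE B (Python) =====
-- def iterNonEmpty(count):
--     # Return-value equivalence only: unlike A, this does not mutate count in place.
--     for i, c in enumerate(count):
--         yield from (i,) * c
-- ===== Notes on version B (the rewrite author's own statement) =====
-- stated objective: idiomatic
-- what changed: Replaces A's single index-managed while loop that repeatedly decrements count[i] in place with a flat enumerate-based generator emitting (i,)*c per element, with no mutation and no per-item index/counter bookkeeping.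
import Mathlib
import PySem

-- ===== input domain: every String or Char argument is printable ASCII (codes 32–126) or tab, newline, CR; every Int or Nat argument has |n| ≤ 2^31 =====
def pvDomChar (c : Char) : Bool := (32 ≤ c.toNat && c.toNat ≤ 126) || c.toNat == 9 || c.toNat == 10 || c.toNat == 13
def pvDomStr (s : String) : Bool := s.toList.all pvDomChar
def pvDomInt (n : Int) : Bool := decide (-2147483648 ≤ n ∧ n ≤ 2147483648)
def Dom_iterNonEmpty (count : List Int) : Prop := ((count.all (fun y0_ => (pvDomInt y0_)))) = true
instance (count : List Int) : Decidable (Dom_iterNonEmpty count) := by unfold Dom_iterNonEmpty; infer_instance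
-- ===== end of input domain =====

-- B differs from A in decomposition only: flat enumerate + repetition instead of an
-- index-managed while loop with in-place decrements.  Equivalence is about the RETURN
-- value (the fully-drained generator): A mutates count in place, B does not.

-- ===== PORT A =====
-- Literal port of A's while loop, drained to a list; the `c < 0` arm returns [] only to
-- make the recursion total — Python A never returns on such inputs (it loops forever),
-- and Pre_iterNonEmpty excludes them.
def iterNonEmptyGo (count : List Int) (i : Nat) : List Int :=
  if h : i < count.length then
    let c := count[i]
    if c = 0 then iterNonEmptyGo count (i + 1)
    else if c < 0 then []
    else i :: iterNonEmptyGo (count.set i (c - 1)) i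
  else []
termination_by ((count.drop i).map Int.toNat).sum + (count.length - i)
decreasing_by
  · have hd : count.drop i = count[i] :: count.drop (i + 1) :=
      List.drop_eq_getElem_cons h
    rw [hd]
    simp only [List.map_cons, List.sum_cons]
    omega
  · have hd : count.drop i = count[i] :: count.drop (i + 1) :=
      List.drop_eq_getElem_cons h
    have hset : (count.set i (count[i] - 1)).drop i
        = (count[i] - 1) :: count.drop (i + 1) := by
      rw [List.set_eq_take_append_cons_drop, if_pos h,
        List.drop_append_of_le_length (by simp [List.length_take]; omega)]
      simp
    rw [hset, hd]
    simp only [List.length_set, List.map_cons, List.sum_cons]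
    omega

def iterNonEmpty (count : List Int) : List Int := iterNonEmptyGo count 0

-- ===== PORT B =====
-- Port of Source B: for i, c in enumerate(count): yield from (i,) * c
def iterNonEmpty_alt (count : List Int) : List Int :=
  (PySem.List.enumerate count 0).flatMap (fun p => PySem.List.pyRepeat [p.1] p.2)

-- ===== PRECONDITION & SPEC =====
-- Pre_ excludes lists containing a negative entry: on those Python A never returns (the
-- while loop decrements count[i] forever), so there is no return value to match.
def Pre_iterNonEmpty (count : List Int) : Prop := ∀ c ∈ count, 0 ≤ c
instance (count : List Int) : Decidable (Pre_iterNonEmpty count) := by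
  unfold Pre_iterNonEmpty; infer_instance
def pvWitness_iterNonEmpty : List Int := [2, 0, 1]
def Spec_iterNonEmpty (count : List Int) (out : List Int) : Prop := out = iterNonEmpty_alt count
instance (count : List Int) (out : List Int) : Decidable (Spec_iterNonEmpty count out) := by unfold Spec_iterNonEmpty; infer_instance

-- ===== CLAIM (what is proved, stated in full; the proofs are below) =====
def Claim_equal_iterNonEmpty : Prop := ∀ (count : List Int), Dom_iterNonEmpty count → Pre_iterNonEmpty count → Spec_iterNonEmpty count (iterNonEmpty count)

-- ===== LEMMAS AND PROOFS =====

-- A's loop from index i equals B's flat form applied to the suffix from i.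
lemma iterNonEmptyGo_eq (count : List Int) (i : Nat)
    (hpre : ∀ c ∈ count, 0 ≤ c) :
    iterNonEmptyGo count i
      = (PySem.List.enumerate (count.drop i) (i : Int)).flatMap
          (fun p => PySem.List.pyRepeat [p.1] p.2) := by
  induction count, i using iterNonEmptyGo.induct with
  | case1 count i h c hc ih =>
    have hd : count.drop i = count[i] :: count.drop (i + 1) :=
      List.drop_eq_getElem_cons h
    have hc' : count[i] = (0 : Int) := hc
    rw [iterNonEmptyGo, dif_pos h, if_pos hc, hd,
      PySem.List.enumerate_cons, List.flatMap_cons, ih hpre]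
    simp [PySem.List.pyRepeat_singleton, hc']
  | case2 count i h c hc hneg =>
    exact absurd (hpre _ (List.getElem_mem h)) (by simp [c] at hneg ⊢; omega)
  | case3 count i h c hc hneg ih =>
    have hpos : (0:Int) < count[i] := by
      have := hpre _ (List.getElem_mem h)
      simp only [c] at hc hneg; omega
    have hd : count.drop i = count[i] :: count.drop (i + 1) :=
      List.drop_eq_getElem_cons h
    have hset : (count.set i (count[i] - 1)).drop i
        = (count[i] - 1) :: count.drop (i + 1) := by
      rw [List.set_eq_take_append_cons_drop, if_pos h,
        List.drop_append_of_le_length (by simp [List.length_take]; omega)]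
      simp
    have hpre' : ∀ x ∈ count.set i (count[i] - 1), 0 ≤ x := by
      intro x hx
      rcases List.mem_or_eq_of_mem_set hx with hx' | rfl
      · exact hpre _ hx'
      · omega
    rw [iterNonEmptyGo, dif_pos h, if_neg hc, if_neg hneg, ih hpre',
      hset, hd, PySem.List.enumerate_cons, PySem.List.enumerate_cons,
      List.flatMap_cons, List.flatMap_cons,
      PySem.List.pyRepeat_singleton, PySem.List.pyRepeat_singleton]
    have : (count[i]).toNat = ((count[i] : Int) - 1).toNat + 1 := by omega
    rw [this, List.replicate_succ]
    simp
  | case4 count i h =>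
    rw [iterNonEmptyGo, dif_neg h, List.drop_eq_nil_of_le (by omega)]
    simp [PySem.List.enumerate]

-- ===== VERDICT (by name: the statement is the Claim_ definition above) =====
theorem iterNonEmpty_spec : Claim_equal_iterNonEmpty := by
  intro count _ hpre
  unfold Spec_iterNonEmpty iterNonEmpty iterNonEmpty_alt
  simpa using iterNonEmptyGo_eq count 0 hpre
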